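-- pv_equiv track=rewrite | github.com/CaseScope/caseScope_2026 | app/ai_triage_find_iocs.py | contains_existing_ioc
-- ===== SOURCE A (Python) =====
-- def contains_existing_ioc(value: str, existing_values: set) -> bool:
--     """
--     Check if a value contains any existing IOC.
--     Used for commands/paths where the IOC might be embedded.
--
--     e.g., command "C:\\path\\WinSCP.exe /flag" contains IOC "winscp.exe"
--     """
--     if not value:
--         return False
--     value_lower = value.lower()
--
--     # Direct match
--     if value_lower in existing_values:
--         return True
--
--     # Check if any existing IOC is contained in the value
--     for existing in existing_values:
--         if existing and len(existing) >= 3:  # Skip very short values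
--             if existing in value_lower:
--                 return True
--
--     return False
-- ===== SOURCE B (Python) =====
-- def contains_existing_ioc(value: str, existing_values: set) -> bool:
--     """Scan the value once per start position and probe a hash set of patterns,
--     instead of running a substring search for every existing IOC."""
--     if not value:
--         return False
--     value_lower = value.lower()
--     if value_lower in existing_values:
--         return True
--     patterns = {e for e in existing_values if e and len(e) >= 3}
--     if not patterns:
--         return False
--     lengths = {len(p) for p in patterns}
--     n = len(value_lower)
--     for i in range(n):
--         for L in lengths:
--             if i + L <= n and value_lower[i:i + L] in patterns:
--                 return True
--     return False
-- ===== Notes on version B (the rewrite author's own statement) =====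
-- stated objective: alternative
-- what changed: Instead of running one substring search per existing IOC, B builds a hash set of the eligible (len>=3) patterns and their distinct lengths once, then scans the value position by position probing the set with slices, so the per-pattern inner search disappears.
import Mathlib
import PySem

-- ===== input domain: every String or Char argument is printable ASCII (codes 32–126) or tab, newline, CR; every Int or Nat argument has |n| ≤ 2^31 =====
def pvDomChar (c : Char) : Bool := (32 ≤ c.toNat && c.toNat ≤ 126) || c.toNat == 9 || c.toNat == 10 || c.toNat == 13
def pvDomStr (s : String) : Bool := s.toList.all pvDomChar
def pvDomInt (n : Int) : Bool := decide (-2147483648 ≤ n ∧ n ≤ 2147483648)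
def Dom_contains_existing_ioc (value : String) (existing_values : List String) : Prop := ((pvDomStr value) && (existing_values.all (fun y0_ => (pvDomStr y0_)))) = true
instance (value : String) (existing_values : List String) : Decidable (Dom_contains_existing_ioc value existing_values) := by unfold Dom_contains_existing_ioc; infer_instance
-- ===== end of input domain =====

-- B scans the value position by position and probes a set of the ≥3-char patterns by slice
-- lookup, instead of running one substring search per existing IOC (objective: alternative).

-- ===== PORT A =====
-- ports work on List Char (PySem.Chars); existing_values is Python set[str] = distinct-element list
def contains_existing_ioc (value : String) (existing_values : List String) : Bool :=
  if value.toList = [] then false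
  else
    let value_lower := PySem.Chars.lower value.toList
    -- 'value_lower in existing_values' (set membership = string equality)
    if existing_values.any (fun e => e.toList == value_lower) then true
    else
      -- 'for existing in …: if existing and len(existing) >= 3: if existing in value_lower: return True'
      existing_values.any (fun existing =>
        (decide (existing.toList ≠ []) && decide (3 ≤ existing.toList.length)) &&
          PySem.Chars.isIn existing.toList value_lower)

-- ===== PORT B =====
def contains_existing_ioc_alt (value : String) (existing_values : List String) : Bool :=
  if value.toList = [] then false
  else
    let value_lower := PySem.Chars.lower value.toList
    if existing_values.any (fun e => e.toList == value_lower) then true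
    else
      -- patterns = {e for e in existing_values if e and len(e) >= 3}  (as char lists)
      let patterns : PySem.Set (List Char) :=
        PySem.Set.ofList ((existing_values.filter
          (fun e => decide (e.toList ≠ []) && decide (3 ≤ e.toList.length))).map String.toList)
      if patterns = [] then false
      else
        let lengths : PySem.Set Nat := PySem.Set.ofList (patterns.map List.length)
        let n := value_lower.length
        -- value_lower[i:i+L] with 0 ≤ i and i+L ≤ n is exactly (drop i).take L
        (List.range n).any (fun i =>
          lengths.any (fun L =>
            decide (i + L ≤ n) && decide ((value_lower.drop i).take L ∈ patterns)))

-- ===== PRECONDITION & SPEC =====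
def Spec_contains_existing_ioc (value : String) (existing_values : List String) (out : Bool) : Prop := out = contains_existing_ioc_alt value existing_values
instance (value : String) (existing_values : List String) (out : Bool) : Decidable (Spec_contains_existing_ioc value existing_values out) := by unfold Spec_contains_existing_ioc; infer_instance

-- ===== CLAIM (what is proved, stated in full; the proofs are below) =====
def Claim_equal_contains_existing_ioc : Prop := ∀ (value : String) (existing_values : List String), Dom_contains_existing_ioc value existing_values → Spec_contains_existing_ioc value existing_values (contains_existing_ioc value existing_values)

-- ===== LEMMAS AND PROOFS =====

-- B's position scan over a nonempty value finds a hit iff some pattern is an infix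
theorem scan_iff_infix (vl : List Char) (patterns : List (List Char)) (hn : vl ≠ []) :
    ((List.range vl.length).any (fun i =>
      (PySem.Set.ofList (patterns.map List.length)).any (fun L =>
        decide (i + L ≤ vl.length) && decide ((vl.drop i).take L ∈ patterns))) = true)
    ↔ ∃ p ∈ patterns, p <:+: vl := by
  simp only [List.any_eq_true, List.mem_range, Bool.and_eq_true, decide_eq_true_eq]
  constructor
  · rintro ⟨i, hi, L, hL, hiL, hmem⟩
    exact ⟨(vl.drop i).take L, hmem,
      ((vl.drop i).take_prefix L).isInfix.trans (vl.drop_suffix i).isInfix⟩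
  · rintro ⟨p, hp, hinf⟩
    obtain ⟨s, t, hst⟩ := hinf
    by_cases hpe : p = []
    · subst hpe
      refine ⟨0, List.length_pos_iff.mpr hn, 0, ?_, by omega, by simpa using hp⟩
      rw [PySem.Set.mem_ofList, List.mem_map]
      exact ⟨[], hp, rfl⟩
    · have hpre : p <+: vl.drop s.length := by
        refine ⟨t, ?_⟩
        rw [← hst, List.append_assoc, List.drop_left]
      have hdlen : (vl.drop s.length).length = vl.length - s.length := List.length_drop
      have hlen : s.length + p.length ≤ vl.length := by
        have h1 := hpre.length_le
        have h2 : s.length ≤ vl.length := by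
          rw [← hst]; simp
        omega
      have hslt : s.length < vl.length := by
        have : 0 < p.length := List.length_pos_iff.mpr hpe
        omega
      refine ⟨s.length, hslt, p.length, ?_, hlen, ?_⟩
      · rw [PySem.Set.mem_ofList, List.mem_map]; exact ⟨p, hp, rfl⟩
      · have := List.prefix_iff_eq_take.mp hpre
        rw [← this]; exact hp

-- A's early-return loop succeeds iff some filtered pattern is an infix
theorem loopA_iff (vl : List Char) (existing_values : List String) :
    (existing_values.any (fun existing =>
      (decide (existing.toList ≠ []) && decide (3 ≤ existing.toList.length)) &&
        PySem.Chars.isIn existing.toList vl) = true)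
    ↔ ∃ p ∈ (existing_values.filter
        (fun e => decide (e.toList ≠ []) && decide (3 ≤ e.toList.length))).map String.toList,
        p <:+: vl := by
  simp only [List.any_eq_true, Bool.and_eq_true, decide_eq_true_eq, List.mem_map,
    List.mem_filter, PySem.Chars.isIn_iff_infix]
  constructor
  · rintro ⟨e, he, ⟨h1, h2⟩, h3⟩
    refine ⟨e.toList, ⟨e, ⟨he, ?_⟩, rfl⟩, h3⟩
    constructor
    · simpa using h1
    · simpa using h2
  · rintro ⟨p, ⟨e, ⟨he, h1, h2⟩, rfl⟩, h3⟩
    refine ⟨e, he, ⟨by simpa using h1, by simpa using h2⟩, h3⟩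

-- ===== VERDICT (by name: the statement is the Claim_ definition above) =====
theorem contains_existing_ioc_spec : Claim_equal_contains_existing_ioc := by
  intro value existing_values _
  unfold Spec_contains_existing_ioc contains_existing_ioc contains_existing_ioc_alt
  by_cases hv : value.toList = []
  · simp [hv]
  · simp only [if_neg hv]
    set vl := PySem.Chars.lower value.toList with hvl
    have hvln : vl ≠ [] := by
      rw [hvl]; simp [PySem.Chars.lower, hv]
    by_cases hd : existing_values.any (fun e => e.toList == vl) = true
    · simp only [hd, if_pos]
    · simp only [Bool.not_eq_true] at hd
      simp only [hd, Bool.false_eq_true, if_false]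
      set raw := (existing_values.filter
        (fun e => decide (e.toList ≠ []) && decide (3 ≤ e.toList.length))).map String.toList
        with hraw
      by_cases hpat : PySem.Set.ofList raw = []
      · simp only [hpat, if_pos]
        rw [← Bool.not_eq_true]
        intro habs
        obtain ⟨p, hp, -⟩ := (loopA_iff vl existing_values).mp habs
        have := (PySem.Set.mem_ofList (xs := raw) (y := p)).mpr (hraw ▸ hp)
        simp [hpat] at this
      · simp only [if_neg hpat]
        apply Bool.eq_iff_iff.mpr
        rw [loopA_iff vl existing_values,
          scan_iff_infix vl (PySem.Set.ofList raw) hvln]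
        constructor
        · rintro ⟨p, hp, h3⟩
          exact ⟨p, (PySem.Set.mem_ofList (xs := raw) (y := p)).mpr (hraw ▸ hp), h3⟩
        · rintro ⟨p, hp, h3⟩
          exact ⟨p, hraw ▸ (PySem.Set.mem_ofList (xs := raw) (y := p)).mp hp, h3⟩
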